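-- pv_equiv track=rewrite | github.com/pekka1234/Terminal_Animator | animator(v.1.75).py | ansi_shortner
-- ===== SOURCE A (Python) =====
-- def ansi_shortner(ansi):
--     result = []
--     num = []
--     for x in ansi:
--         if x.isdigit():
--             num.append(x)
--         else:
--             result.append("".join(num))
--             num = []
--     return result + [ansi[-1]]
-- ===== SOURCE B (Python) =====
-- def ansi_shortner(ansi):
--     # Run-based scan: slice out each maximal digit run before a non-digit,
--     # instead of A's per-character accumulator state machine.
--     groups = []
--     rest = ansi
--     while rest:
--         k = 0
--         while k < len(rest) and rest[k].isdigit():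
--             k += 1
--         if k == len(rest):
--             break
--         groups.append(rest[:k])
--         rest = rest[k + 1:]
--     return groups + [ansi[-1]]
-- ===== Notes on version B (the rewrite author's own statement) =====
-- stated objective: alternative
-- what changed: Replaces A's per-character state machine (digit accumulator list flushed at every non-digit) with a run-based scan that slices out each maximal digit run and jumps past the following non-digit.
import Mathlib
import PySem

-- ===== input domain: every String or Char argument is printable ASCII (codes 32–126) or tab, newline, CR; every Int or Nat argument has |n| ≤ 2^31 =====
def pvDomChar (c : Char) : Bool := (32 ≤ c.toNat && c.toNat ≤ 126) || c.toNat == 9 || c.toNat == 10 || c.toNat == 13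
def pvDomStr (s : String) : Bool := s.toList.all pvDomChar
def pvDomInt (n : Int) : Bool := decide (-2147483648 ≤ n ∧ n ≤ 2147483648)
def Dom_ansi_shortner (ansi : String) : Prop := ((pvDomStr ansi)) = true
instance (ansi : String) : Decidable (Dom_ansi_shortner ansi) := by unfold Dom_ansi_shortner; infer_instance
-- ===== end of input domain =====

-- B is an alternative run-based scan (maximal digit runs sliced out) instead of A's
-- per-character accumulator state machine; return values agree on all non-empty strings
-- (both raise IndexError on "").

-- ===== PORT A =====
-- one loop step of A: append digit to num, or flush num into result
def pvStepA (p : List String × List Char) (x : Char) : List String × List Char :=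
  if PySem.Chars.isdigit x then (p.1, p.2 ++ [x]) else (p.1 ++ [String.mk p.2], [])

def ansi_shortner (ansi : String) : List String :=
  let st := ansi.toList.foldl pvStepA ([], [])
  match PySem.Str.pyGet? ansi (-1) with
  | some c => st.1 ++ [String.mk [c]]   -- result + [ansi[-1]]
  | none => []                          -- IndexError on "", excluded by Pre_

-- ===== PORT B =====
-- inner while: advance k over digits (k = run length from position k on)
def pvRunLen (rest : List Char) (k : Nat) : Nat :=
  if h : k < rest.length then
    if PySem.Chars.isdigit (rest[k]'h) then pvRunLen rest (k + 1) else k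
  else k
termination_by rest.length - k

-- outer while over `rest`; rest[:k] = take k, rest[k+1:] = drop (k+1) (0 ≤ k: exact)
def pvGroupsB (rest : List Char) (acc : List String) : List String :=
  if hr : rest = [] then acc
  else
    let k := pvRunLen rest 0
    if hk : k = rest.length then acc
    else pvGroupsB (rest.drop (k + 1)) (acc ++ [String.mk (rest.take k)])
termination_by rest.length
decreasing_by
  have : rest.length ≠ 0 := fun h => hr (List.eq_nil_of_length_eq_zero h)
  simp [List.length_drop]; omega

def ansi_shortner_alt (ansi : String) : List String :=
  let groups := pvGroupsB ansi.toList []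
  match PySem.Str.pyGet? ansi (-1) with
  | some c => groups ++ [String.mk [c]]
  | none => []                          -- IndexError on "", excluded by Pre_

-- ===== PRECONDITION & SPEC =====
-- Pre_ excludes only the empty string, on which A raises IndexError (ansi[-1]).
def Pre_ansi_shortner (ansi : String) : Prop := ansi ≠ ""
instance (ansi : String) : Decidable (Pre_ansi_shortner ansi) := by unfold Pre_ansi_shortner; infer_instance
def pvWitness_ansi_shortner : String := "12a3;"

def Spec_ansi_shortner (ansi : String) (out : List String) : Prop := out = ansi_shortner_alt ansi
instance (ansi : String) (out : List String) : Decidable (Spec_ansi_shortner ansi out) := by unfold Spec_ansi_shortner; infer_instance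

-- ===== CLAIM (what is proved, stated in full; the proofs are below) =====
def Claim_equal_ansi_shortner : Prop := ∀ (ansi : String), Dom_ansi_shortner ansi → Pre_ansi_shortner ansi → Spec_ansi_shortner ansi (ansi_shortner ansi)

-- ===== LEMMAS AND PROOFS =====

-- reference recursion: the digit-run decomposition both loops compute
def pvGrp (cs : List Char) : List String :=
  match h : cs.dropWhile PySem.Chars.isdigit with
  | [] => []
  | _ :: rs => String.mk (cs.takeWhile PySem.Chars.isdigit) :: pvGrp rs
termination_by cs.length
decreasing_by
  have h1 := List.length_dropWhile_le (p := PySem.Chars.isdigit) (l := cs)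
  rw [h] at h1; simp at h1; omega

theorem pvGrp_nil (cs : List Char) (h : cs.dropWhile PySem.Chars.isdigit = []) :
    pvGrp cs = [] := by
  rw [pvGrp.eq_def]
  split
  · rfl
  · next heq => rw [h] at heq; cases heq

theorem pvGrp_cons (cs : List Char) (c : Char) (rs : List Char)
    (h : cs.dropWhile PySem.Chars.isdigit = c :: rs) :
    pvGrp cs = String.mk (cs.takeWhile PySem.Chars.isdigit) :: pvGrp rs := by
  rw [pvGrp.eq_def]
  split
  · next heq => rw [h] at heq; cases heq
  · next heq =>
      rw [h] at heq
      cases heq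
      rfl

theorem pvRunLen_eq (rest : List Char) (k : Nat) (hk : k ≤ rest.length) :
    pvRunLen rest k = k + ((rest.drop k).takeWhile PySem.Chars.isdigit).length := by
  fun_induction pvRunLen rest k with
  | case1 k h hd ih =>
    rw [ih (by omega)]
    rw [List.drop_eq_getElem_cons h, List.takeWhile_cons_of_pos hd]
    simp; omega
  | case2 k h hd =>
    rw [List.drop_eq_getElem_cons h, List.takeWhile_cons_of_neg hd]
    simp
  | case3 k h =>
    have hke : k = rest.length := by omega
    subst hke
    simp

theorem pvGroupsB_eq (rest : List Char) (acc : List String) :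
    pvGroupsB rest acc = acc ++ pvGrp rest := by
  fun_induction pvGroupsB rest acc with
  | case1 acc =>
    rw [pvGrp_nil [] (by simp)]; simp
  | case2 rest acc hr k heq =>
    -- all of rest is digits: dropWhile = []
    have hk' : pvRunLen rest 0 = rest.length := heq
    rw [pvRunLen_eq rest 0 (by omega)] at hk'
    have hlen := congrArg List.length
      (List.takeWhile_append_dropWhile (p := PySem.Chars.isdigit) (l := rest))
    simp only [List.length_append, List.length_drop] at hlen
    rw [pvGrp_nil rest (List.eq_nil_of_length_eq_zero (by simp at hk'; omega))]
    simp
  | case3 rest acc hr k hne ih =>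
    have hkval : k = (rest.takeWhile PySem.Chars.isdigit).length := by
      rw [show k = pvRunLen rest 0 from rfl, pvRunLen_eq rest 0 (by omega)]; simp
    rw [hkval] at ih ⊢
    have hlen := List.takeWhile_append_dropWhile (p := PySem.Chars.isdigit) (l := rest)
    have hkne : pvRunLen rest 0 ≠ rest.length := hne
    rw [pvRunLen_eq rest 0 (by omega)] at hkne
    simp only [List.drop_zero, Nat.zero_add] at hkne
    have hdne : rest.dropWhile PySem.Chars.isdigit ≠ [] := by
      intro h0
      have := congrArg List.length hlen
      rw [h0] at this; simp at this; omega
    obtain ⟨c, rs, hcrs⟩ := List.exists_cons_of_ne_nil hdne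
    have htake : rest.take (rest.takeWhile PySem.Chars.isdigit).length
        = rest.takeWhile PySem.Chars.isdigit :=
      (List.prefix_iff_eq_take.mp (List.takeWhile_prefix _)).symm
    have hdropd : rest.drop (rest.takeWhile PySem.Chars.isdigit).length
        = rest.dropWhile PySem.Chars.isdigit := by
      have h2 := List.drop_left (l₁ := rest.takeWhile PySem.Chars.isdigit)
        (l₂ := rest.dropWhile PySem.Chars.isdigit)
      rw [hlen] at h2
      exact h2
    have hdrop : rest.drop ((rest.takeWhile PySem.Chars.isdigit).length + 1) = rs := by
      have h1 := congrArg (List.drop 1) hdropd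
      rw [hcrs] at h1
      simpa [List.drop_drop] using h1
    rw [ih, htake, hdrop]
    rw [pvGrp_cons rest c rs hcrs]
    simp

-- A's fold computes pvGrp (generalised over accumulated digits)
theorem pvFoldA_eq (cs : List Char) (res : List String) (num : List Char)
    (hnum : ∀ c ∈ num, PySem.Chars.isdigit c = true) :
    (List.foldl pvStepA (res, num) cs).1 = res ++ pvGrp (num ++ cs) := by
  induction cs generalizing res num with
  | nil =>
    have hdw : num.dropWhile PySem.Chars.isdigit = [] :=
      List.dropWhile_eq_nil_iff.mpr hnum
    rw [pvGrp_nil (num ++ []) (by simpa using hdw)]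
    simp
  | cons c cs ih =>
    simp only [List.foldl_cons, pvStepA]
    by_cases hc : PySem.Chars.isdigit c = true
    · rw [if_pos hc]
      have := ih res (num ++ [c])
        (by intro x hx; simp at hx; rcases hx with h | h
            · exact hnum x h
            · subst h; exact hc)
      rw [this]; simp
    · rw [if_neg hc]
      have := ih (res ++ [String.mk num]) [] (by simp)
      rw [this]
      have hdwnum : num.dropWhile PySem.Chars.isdigit = [] :=
        List.dropWhile_eq_nil_iff.mpr hnum
      have htwnum : num.takeWhile PySem.Chars.isdigit = num :=
        List.takeWhile_eq_self_iff.mpr hnum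
      have hdw : (num ++ c :: cs).dropWhile PySem.Chars.isdigit = c :: cs := by
        rw [List.dropWhile_append]
        simp [hdwnum, hc]
      have htw : (num ++ c :: cs).takeWhile PySem.Chars.isdigit = num := by
        rw [List.takeWhile_append]
        simp [htwnum, List.takeWhile_cons_of_neg (by simpa using hc)]
      rw [pvGrp_cons (num ++ c :: cs) c cs hdw]
      simp [htw]

-- ===== VERDICT (by name: the statement is the Claim_ definition above) =====
theorem ansi_shortner_spec : Claim_equal_ansi_shortner := by
  intro ansi _ hpre
  unfold Spec_ansi_shortner
  simp only [ansi_shortner, ansi_shortner_alt]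
  rw [pvFoldA_eq ansi.toList [] [] (by simp), pvGroupsB_eq]
  simp
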